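-- pv_equiv track=rewrite | github.com/AndrewHenney/cp1404_pracs | prac_10/testing.py | phrase_to_sentence
-- ===== SOURCE A (Python) =====
-- def phrase_to_sentence(word):
--     """
--     >>> phrase_to_sentence('hello')=='Hello.'
--     True
--     >>> phrase_to_sentence('It is an ex parrot.')=='It is an ex parrot.'
--     True
--     >>> phrase_to_sentence('it works')=='It works.'
--     True
--     """
--     new_word=''
--     for i, char in enumerate(word):
--         if (i == 0 and char.islower()):
--             new_word += char.upper()
--         else:
--             new_word+=char
--     if new_word[-1] !='.':
--         new_word+='.'
--     return new_word
-- ===== SOURCE B (Python) =====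
-- def phrase_to_sentence(word):
--     new_word = word[0].upper() + word[1:] if word and word[0].islower() else word
--     if new_word[-1] != '.':
--         new_word += '.'
--     return new_word
-- ===== Notes on version B (the rewrite author's own statement) =====
-- stated objective: simpler
-- what changed: Replaces the enumerate loop that rebuilds the string character by character with a direct closed-form slice: capitalize the first character via word[0].upper() + word[1:], then append the period by indexing.
import Mathlib
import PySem

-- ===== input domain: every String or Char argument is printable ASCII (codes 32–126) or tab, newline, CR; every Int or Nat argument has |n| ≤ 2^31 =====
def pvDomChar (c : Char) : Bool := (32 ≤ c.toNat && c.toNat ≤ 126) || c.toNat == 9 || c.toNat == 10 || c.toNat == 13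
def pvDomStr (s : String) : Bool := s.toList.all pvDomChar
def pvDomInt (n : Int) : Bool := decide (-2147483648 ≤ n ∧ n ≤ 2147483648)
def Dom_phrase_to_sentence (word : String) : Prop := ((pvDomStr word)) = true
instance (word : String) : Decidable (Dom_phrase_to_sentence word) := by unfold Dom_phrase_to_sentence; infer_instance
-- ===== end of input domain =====

-- B replaces A's character-by-character accumulation loop with a direct closed-form
-- slice (capitalize the head, keep the tail); objective: simpler.

-- ===== PORT A =====
-- the enumerate loop building new_word one character at a time
def pvLoopA (word : String) : List Char :=
  (PySem.List.enumerate word.toList 0).foldl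
    (fun acc p =>
      if p.1 == 0 && PySem.Chars.islower p.2 then acc ++ [PySem.Chars.upperChar p.2]
      else acc ++ [p.2]) []

def phrase_to_sentence (word : String) : String :=
  let nw := pvLoopA word
  -- new_word[-1]: raises IndexError on empty; Pre_ excludes that input
  match PySem.List.pyGet? nw (-1) with
  | some c => if c ≠ '.' then String.mk (nw ++ ['.']) else String.mk nw
  | none => String.mk nw

-- ===== PORT B =====
def phrase_to_sentence_alt (word : String) : String :=
  let nw : List Char :=
    match word.toList with
    | [] => word.toList
    | c :: rest => if PySem.Chars.islower c then PySem.Chars.upperChar c :: rest else word.toList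
  match PySem.List.pyGet? nw (-1) with
  | some c => if c ≠ '.' then String.mk (nw ++ ['.']) else String.mk nw
  | none => String.mk nw

-- ===== PRECONDITION & SPEC =====
-- Pre_ excludes the empty string, on which both Pythons raise IndexError (new_word[-1]).
def Pre_phrase_to_sentence (word : String) : Prop := word ≠ ""
instance (word : String) : Decidable (Pre_phrase_to_sentence word) := by unfold Pre_phrase_to_sentence; infer_instance
def pvWitness_phrase_to_sentence : String := "it works"

def Spec_phrase_to_sentence (word : String) (out : String) : Prop := out = phrase_to_sentence_alt word
instance (word : String) (out : String) : Decidable (Spec_phrase_to_sentence word out) := by unfold Spec_phrase_to_sentence; infer_instance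

-- ===== CLAIM (what is proved, stated in full; the proofs are below) =====
def Claim_equal_phrase_to_sentence : Prop := ∀ (word : String), Dom_phrase_to_sentence word → Pre_phrase_to_sentence word → Spec_phrase_to_sentence word (phrase_to_sentence word)

-- ===== LEMMAS AND PROOFS =====

-- A's loop body appends each character unchanged once the index is nonzero
lemma loopA_tail (xs : List Char) (s : Int) (acc : List Char) (hs : 1 ≤ s) :
    (PySem.List.enumerate xs s).foldl
      (fun acc p =>
        if p.1 == 0 && PySem.Chars.islower p.2 then acc ++ [PySem.Chars.upperChar p.2]
        else acc ++ [p.2]) acc = acc ++ xs := by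
  induction xs generalizing s acc with
  | nil => simp [PySem.List.enumerate_nil]
  | cons c rest ih =>
    rw [PySem.List.enumerate_cons]
    simp only [List.foldl_cons]
    have h0 : (s == 0) = false := by simp; omega
    rw [if_neg (by simp [h0] : ¬ ((s == 0 && PySem.Chars.islower c) = true))]
    rw [ih (s + 1) _ (by omega)]
    simp

-- A's loop computes exactly B's closed-form capitalized list
lemma loopA_eq (word : String) :
    pvLoopA word =
      (match word.toList with
       | [] => word.toList
       | c :: rest => if PySem.Chars.islower c then PySem.Chars.upperChar c :: rest else word.toList) := by
  unfold pvLoopA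
  cases h : word.toList with
  | nil => simp [PySem.List.enumerate_nil]
  | cons c rest =>
    rw [PySem.List.enumerate_cons]
    simp only [List.foldl_cons]
    by_cases hl : PySem.Chars.islower c = true
    · simp only [hl, show ((0 : Int) == 0 && true) = true by decide, if_true]
      rw [loopA_tail rest (0+1) _ (by omega)]
      simp
    · simp only [Bool.not_eq_true] at hl
      simp only [hl, Bool.and_false, Bool.false_eq_true, if_false]
      rw [loopA_tail rest (0+1) _ (by omega)]
      simp

-- ===== VERDICT (by name: the statement is the Claim_ definition above) =====
theorem phrase_to_sentence_spec : Claim_equal_phrase_to_sentence := by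
  intro word _ _
  unfold Spec_phrase_to_sentence phrase_to_sentence phrase_to_sentence_alt
  rw [loopA_eq]
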